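-- pv_equiv track=rewrite | github.com/Eui9179/algorithm-study | programmers/python/level2/p42578.py | solution
-- ===== SOURCE A (Python) =====
-- from itertools import combinations
--
-- def solution(clothes):
--     answer = 0
--
--     # dict_c: 옷 개수를 map으로 만듬
--     dict_c = {c[1] : 0 for c in clothes}
--
--     # # 종류 30개일때 최대값
--     # if len(dict_c) == 30:
--     #     return 1073741823;
--
--     # 각 key에 옷 개수 저장
--     for c in clothes:
--         dict_c[c[1]]+=1
--
--     # 옷 종류(key)
--     dic_keys = list(dict_c.keys())
--
--     # 한가지만 입을 때 개수
--     answer = sum(list(dict_c.values()))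
--
--     # 두개 이상 옷을 입을 때 조합 개수
--     for i in range(1, len(dic_keys)):
--
--         # dic_keys 리스트에서 i+1만큼 조합을 만듬(1~개부터 최대 len(dic_keys)까지)
--         selected_list = list(combinations(dic_keys, i+1))
--
--         for selected in selected_list:
--             tmp = 1
--             for s in selected:
--                 tmp *= dict_c[s] # 각 자리에 들어갈 수 있는 개수
--             answer += tmp
--     return answer
-- ===== SOURCE B (Python) =====
-- def solution(clothes):
--     counts = {}
--     for c in clothes:
--         kind = c[1]
--         counts[kind] = counts.get(kind, 0) + 1
--     answer = 1
--     for v in counts.values():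
--         answer *= v + 1
--     return answer - 1
-- ===== Notes on version B (the rewrite author's own statement) =====
-- stated objective: faster
-- what changed: Replaces A's enumeration of all size-r key combinations (summing products of counts over every non-empty subset of categories) with the closed form: multiply (count+1) over categories and subtract 1.
import Mathlib
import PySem

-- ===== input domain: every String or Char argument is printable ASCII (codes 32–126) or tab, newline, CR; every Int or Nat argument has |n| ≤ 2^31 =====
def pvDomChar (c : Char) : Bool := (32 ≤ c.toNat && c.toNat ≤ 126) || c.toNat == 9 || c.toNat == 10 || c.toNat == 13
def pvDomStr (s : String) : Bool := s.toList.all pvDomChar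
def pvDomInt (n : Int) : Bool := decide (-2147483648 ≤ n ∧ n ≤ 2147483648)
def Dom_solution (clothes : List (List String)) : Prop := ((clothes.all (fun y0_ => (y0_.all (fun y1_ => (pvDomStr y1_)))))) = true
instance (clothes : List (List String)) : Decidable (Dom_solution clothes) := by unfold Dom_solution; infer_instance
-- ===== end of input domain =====

-- B replaces A's enumeration of all size-r category combinations by the closed form
-- prod(count+1) - 1; measurably faster (asymptotic: O(n+k) vs O(2^k·k) in the number k of categories).


-- ===== PORT A =====
-- literal port of A: build {kind: 0}, count into it, then sum the values and add,
-- for every combination size i+1 (i = 1 .. len(keys)-1), the product of counts of each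
-- selected kind over all combinations of keys. c[1] is pyGet?; Pre_ guarantees it is `some`,
-- so `.getD ""` is never the default.
def solution (clothes : List (List String)) : Int :=
  let dict0 : PySem.Dict String Int :=
    clothes.foldl (fun d c => d.insert ((PySem.List.pyGet? c 1).getD "") 0) PySem.Dict.empty
  let dictC : PySem.Dict String Int :=
    clothes.foldl (fun d c => d.modify ((PySem.List.pyGet? c 1).getD "") 0 (· + 1)) dict0
  let dicKeys := dictC.keys
  let answer := dictC.values.sum
  (PySem.List.pyRange 1 (dicKeys.length : Int) 1).foldl
    (fun answer i =>
      (PySem.List.combinations dicKeys (i.toNat + 1)).foldl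
        (fun answer selected =>
          answer + selected.foldl (fun tmp s => tmp * dictC.getD s 0) 1)
        answer)
    answer

-- ===== PORT B =====
-- literal port of B: one counting pass, then prod(count+1) - 1.
def solution_alt (clothes : List (List String)) : Int :=
  let counts : PySem.Dict String Int :=
    clothes.foldl (fun d c =>
      let kind := (PySem.List.pyGet? c 1).getD ""
      d.insert kind (d.getD kind 0 + 1)) PySem.Dict.empty
  counts.values.foldl (fun a v => a * (v + 1)) 1 - 1

-- ===== PRECONDITION & SPEC =====
-- Pre_ excludes exactly the inputs where some inner list has fewer than 2 elements:
-- there Python's c[1] raises IndexError (in both A and B).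
def Pre_solution (clothes : List (List String)) : Prop :=
  ∀ c ∈ clothes, 2 ≤ c.length
instance (clothes : List (List String)) : Decidable (Pre_solution clothes) := by
  unfold Pre_solution; infer_instance

def pvWitness_solution : List (List String) :=
  [["yellow hat", "headgear"], ["blue sunglasses", "eyewear"], ["green turban", "headgear"]]

def Spec_solution (clothes : List (List String)) (out : Int) : Prop := out = solution_alt clothes
instance (clothes : List (List String)) (out : Int) : Decidable (Spec_solution clothes out) := by unfold Spec_solution; infer_instance

-- ===== CLAIM (what is proved, stated in full; the proofs are below) =====
def Claim_equal_solution : Prop := ∀ (clothes : List (List String)), Dom_solution clothes → Pre_solution clothes → Spec_solution clothes (solution clothes)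

-- ===== LEMMAS AND PROOFS =====

-- the kind of one clothes item, as both ports read it
def pvKind (c : List String) : String := (PySem.List.pyGet? c 1).getD ""

-- sum over all size-r combinations of K of the product of f over the combination
def pvP (K : List String) (f : String → Int) (r : Nat) : Int :=
  ((PySem.List.combinations K r).map (fun sel => (sel.map f).prod)).sum

lemma pvP_zero (K : List String) (f : String → Int) : pvP K f 0 = 1 := by
  simp [pvP, PySem.List.combinations_zero]

lemma pvP_gt (K : List String) (f : String → Int) {r : Nat} (h : K.length < r) :
    pvP K f r = 0 := by
  simp [pvP, PySem.List.combinations_eq_nil_of_length_lt K h]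

lemma pvP_one (K : List String) (f : String → Int) : pvP K f 1 = (K.map f).sum := by
  simp [pvP, PySem.List.combinations_one, List.map_map, Function.comp_def]

lemma pvP_cons (x : String) (K : List String) (f : String → Int) (r : Nat) :
    pvP (x :: K) f (r + 1) = f x * pvP K f r + pvP K f (r + 1) := by
  simp [pvP, PySem.List.combinations_cons_succ, List.map_map, Function.comp_def,
    List.sum_map_mul_left]

-- the binomial-theorem-style identity: summing pvP over all sizes gives the product of (f k + 1)
lemma pvP_total : ∀ (K : List String) (f : String → Int),
    ((List.range (K.length + 1)).map (pvP K f)).sum = (K.map (fun k => f k + 1)).prod := by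
  intro K
  induction K with
  | nil => intro f; simp [pvP_zero, List.range_succ]
  | cons x K ih =>
    intro f
    have hT : ((List.range (K.length + 1)).map (fun r => pvP K f (r + 1))).sum
        = ((List.range (K.length + 1)).map (pvP K f)).sum - 1 := by
      conv_rhs => rw [List.range_succ_eq_map]
      rw [List.range_succ, List.map_append, List.sum_append]
      simp [List.map_map, Function.comp_def, pvP_zero,
        pvP_gt K f (Nat.lt_succ_self K.length)]
    calc ((List.range (x :: K).length.succ).map (pvP (x :: K) f)).sum
        = pvP (x :: K) f 0 + ((List.range (K.length + 1)).map (fun r => pvP (x :: K) f (r+1))).sum := by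
          rw [List.range_succ_eq_map]; simp [List.map_map, Function.comp_def]
      _ = 1 + ((List.range (K.length + 1)).map (fun r => f x * pvP K f r + pvP K f (r+1))).sum := by
          simp [pvP_zero, pvP_cons]
      _ = 1 + (f x * ((List.range (K.length + 1)).map (pvP K f)).sum
            + (((List.range (K.length + 1)).map (pvP K f)).sum - 1)) := by
          rw [← hT, ← List.sum_map_mul_left _ (pvP K f) (f x)]
          rw [show (fun r => f x * pvP K f r + pvP K f (r+1)) = (fun r => (fun r => f x * pvP K f r) r + (fun r => pvP K f (r+1)) r) from rfl]
          rw [List.sum_map_add]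
      _ = (f x + 1) * (K.map (fun k => f k + 1)).prod := by rw [← ih f]; ring
      _ = ((x :: K).map (fun k => f k + 1)).prod := by simp

-- zeros pass
lemma pv_zeros : ∀ (ks : List String) (d : PySem.Dict String Int),
    d.items = d.keys.map (fun k => (k, (0:Int))) →
    (ks.foldl (fun d k => d.insert k 0) d).items
      = (PySem.Set.update d.keys ks).map (fun k => (k, (0:Int))) := by
  intro ks
  induction ks with
  | nil => intro d h; simpa [PySem.Set.update] using h
  | cons x ks ih =>
    intro d h
    have hkeys : d.keys = d.items.map Prod.fst := rfl
    by_cases hc : d.contains x = true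
    · have hmem : x ∈ d.keys := (PySem.Dict.contains_iff_mem_keys d x).mp hc
      have hadd : PySem.Set.add d.keys x = d.keys := by
        simp [PySem.Set.add, hmem]
      have hitems : (d.insert x (0:Int)).items = d.items := by
        rw [PySem.Dict.items_insert_of_contains d 0 hc, h, List.map_map]
        refine List.map_congr_left ?_
        intro k hk
        by_cases hkx : k == x
        · simp [eq_of_beq hkx]
        · simp
          exact fun h => h.symm
      have hk2 : (d.insert x (0:Int)).keys = d.keys := PySem.Dict.keys_insert_of_contains d 0 hc
      have := ih (d.insert x 0) (by rw [hitems, hk2, h])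
      rw [List.foldl_cons, this, hk2]
      simp [PySem.Set.update, hadd]
    · have hc' : d.contains x = false := by simpa using hc
      have hnm : x ∉ d.keys := fun hm => hc ((PySem.Dict.contains_iff_mem_keys d x).mpr hm)
      have hadd : PySem.Set.add d.keys x = d.keys ++ [x] := by
        simp [PySem.Set.add, hnm]
      have hitems : (d.insert x (0:Int)).items = d.items ++ [(x, 0)] :=
        PySem.Dict.items_insert_of_not_contains d 0 hc'
      have hk2 : (d.insert x (0:Int)).keys = d.keys ++ [x] :=
        PySem.Dict.keys_insert_of_not_contains d 0 hc'
      have := ih (d.insert x 0) (by rw [hitems, hk2, h]; simp)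
      rw [List.foldl_cons, this, hk2]
      simp [PySem.Set.update, hadd]

-- increment pass
lemma pv_inc : ∀ (l : List String) (d : PySem.Dict String Int),
    (∀ k ∈ l, d.contains k = true) → d.keys.Nodup →
    (l.foldl (fun d k => d.modify k 0 (· + 1)) d).items
      = d.items.map (fun p => (p.1, p.2 + (l.count p.1 : Int))) := by
  intro l
  induction l with
  | nil => intro d _ _; simp
  | cons x l ih =>
    intro d hall hnd
    have hcx : d.contains x = true := hall x (by simp)
    have hmod : (d.modify x (0:Int) (· + 1)).items
        = d.items.map (fun p => if p.1 == x then (x, d.getD x 0 + 1) else p) := by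
      rw [show d.modify x (0:Int) (· + 1) = d.insert x (d.getD x 0 + 1) from rfl]
      exact PySem.Dict.items_insert_of_contains d _ hcx
    have hall' : ∀ k ∈ l, (d.modify x (0:Int) (· + 1)).contains k = true := by
      intro k hk
      rw [PySem.Dict.contains_modify]
      simp [hall k (by simp [hk])]
    have hnd' : (d.modify x (0:Int) (· + 1)).keys.Nodup := by
      rw [PySem.Dict.keys_modify, PySem.Dict.keys_insert_of_contains d _ hcx]
      exact hnd
    rw [List.foldl_cons, ih _ hall' hnd', hmod, List.map_map]
    refine List.map_congr_left ?_
    intro p hp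
    by_cases hpx : p.1 == x
    · have hx : p.1 = x := eq_of_beq hpx
      have hget : d.getD x 0 = p.2 := by
        have : (p.1, p.2) ∈ d.items := by simpa using hp
        rw [← hx]; exact PySem.Dict.getD_of_mem_items d this hnd 0
      rw [← hx] at hget
      simp [← hx]
      omega
    · have hx : p.1 ≠ x := fun h => hpx (by simp [h])
      simp [hx, List.count_cons]
      exact fun h => hx h.symm

-- A's dict equals Counter(kinds)
lemma pv_dict_eq_counter (clothes : List (List String)) :
    (clothes.foldl (fun d c => d.modify ((PySem.List.pyGet? c 1).getD "") 0 (· + 1))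
      (clothes.foldl (fun d c => d.insert ((PySem.List.pyGet? c 1).getD "") 0) PySem.Dict.empty))
    = PySem.Dict.counter (clothes.map pvKind) := by
  have h1 : clothes.foldl (fun d c => d.insert ((PySem.List.pyGet? c 1).getD "") 0)
        (PySem.Dict.empty : PySem.Dict String Int)
      = (clothes.map pvKind).foldl (fun d k => d.insert k 0) PySem.Dict.empty :=
    (List.foldl_map (f := pvKind) (g := fun (d : PySem.Dict String Int) k => d.insert k 0)).symm
  have h2 : clothes.foldl (fun d c => d.modify ((PySem.List.pyGet? c 1).getD "") 0 (· + 1))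
        ((clothes.map pvKind).foldl (fun d k => d.insert k 0)
          (PySem.Dict.empty : PySem.Dict String Int))
      = (clothes.map pvKind).foldl (fun d k => d.modify k 0 (· + 1))
        ((clothes.map pvKind).foldl (fun d k => d.insert k 0) PySem.Dict.empty) :=
    (List.foldl_map (f := pvKind)
      (g := fun (d : PySem.Dict String Int) k => d.modify k 0 (· + 1))).symm
  rw [h1, h2]
  generalize clothes.map pvKind = ks
  have hz : ((ks.foldl (fun d k => d.insert k 0) PySem.Dict.empty : PySem.Dict String Int)).items
      = (PySem.Set.ofList ks).map (fun k => (k, (0:Int))) := by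
    have := pv_zeros ks PySem.Dict.empty (by rfl)
    rw [this]
    rfl
  have hkeys : ((ks.foldl (fun d k => d.insert k 0) PySem.Dict.empty : PySem.Dict String Int)).keys
      = PySem.Set.ofList ks := by
    rw [show ∀ d : PySem.Dict String Int, d.keys = d.items.map Prod.fst from fun _ => rfl, hz]
    simp [Function.comp_def]
  have hinc := pv_inc ks (ks.foldl (fun d k => d.insert k 0) PySem.Dict.empty)
    (by intro k hk
        rw [PySem.Dict.contains_iff_mem_keys, hkeys, PySem.Set.mem_ofList]
        exact hk)
    (by rw [hkeys]; exact PySem.Set.nodup_ofList ks)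
  apply PySem.Dict.ext
  rw [hinc, hz, PySem.Dict.items_counter, List.map_map]
  simp

lemma pv_pyRange_one (n : Nat) :
    PySem.List.pyRange 1 (n : Int) 1 = (List.range (n - 1)).map (fun j : Nat => (1 : Int) + j) := by
  rw [PySem.List.pyRange_of_pos 1 (n : Int) (by norm_num)]
  have hif : (if (1 : Int) < (n : Int) then (((n : Int) - 1 + 1 - 1) / 1).toNat else 0) = n - 1 := by
    split_ifs with h <;> omega
  rw [hif]
  refine List.map_congr_left ?_
  intro j _
  ring

lemma pv_head_tail (x : String) (K : List String) (f : String → Int) :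
    pvP (x :: K) f 1 + ((List.range K.length).map (fun j => pvP (x :: K) f (j + 2))).sum
      = ((x :: K).map (fun k => f k + 1)).prod - 1 := by
  rw [← pvP_total (x :: K) f]
  conv_rhs => rw [show (x :: K).length + 1 = K.length + 1 + 1 from rfl,
    List.range_succ_eq_map, List.range_succ_eq_map]
  simp [List.map_map, Function.comp_def, pvP_zero]

-- the value of A in closed combinatorial form
lemma pv_A_value (clothes : List (List String)) :
    solution clothes
      = pvP (PySem.Set.ofList (clothes.map pvKind)) (fun s => ((clothes.map pvKind).count s : Int)) 1
        + ((List.range ((PySem.Set.ofList (clothes.map pvKind)).length - 1)).map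
            (fun j => pvP (PySem.Set.ofList (clothes.map pvKind))
              (fun s => ((clothes.map pvKind).count s : Int)) (j + 2))).sum := by
  have hdict := pv_dict_eq_counter clothes
  simp only [solution]
  rw [hdict]
  generalize clothes.map pvKind = ks
  rw [PySem.Dict.keys_counter]
  have hvals : (PySem.Dict.counter ks).values
      = (PySem.Set.ofList ks).map (fun s => ((ks.count s : Int))) := by
    rw [show (PySem.Dict.counter ks).values = (PySem.Dict.counter ks).items.map Prod.snd from rfl,
      PySem.Dict.items_counter]
    simp [List.map_map, Function.comp_def]
  rw [hvals, ← pvP_one]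
  have hprod : ∀ sel : List String,
      sel.foldl (fun tmp s => tmp * ((ks.count s : Int))) 1
        = (sel.map (fun s => ((ks.count s : Int)))).prod := by
    intro sel
    rw [List.prod_eq_foldl, List.foldl_map]
  have hinner : ∀ (acc : Int) (i : Int),
      (PySem.List.combinations (PySem.Set.ofList ks) (i.toNat + 1)).foldl
        (fun answer selected =>
          answer + selected.foldl (fun tmp s => tmp * (PySem.Dict.counter ks).getD s 0) 1) acc
      = acc + pvP (PySem.Set.ofList ks) (fun s => ((ks.count s : Int))) (i.toNat + 1) := by
    intro acc i
    simp only [PySem.Dict.getD_counter, hprod]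
    rw [PySem.List.foldl_add]
    rfl
  simp only [hinner]
  rw [PySem.List.foldl_add, pv_pyRange_one, List.map_map]
  have htn : ∀ j : Nat, ((1 : Int) + (j : Int)).toNat + 1 = j + 2 := by intro j; omega
  simp [Function.comp_def, htn]

-- the value of B in closed form
lemma pv_B_value (clothes : List (List String)) :
    solution_alt clothes
      = ((PySem.Set.ofList (clothes.map pvKind)).map
          (fun s => ((clothes.map pvKind).count s : Int) + 1)).prod - 1 := by
  simp only [solution_alt]
  have h1 : clothes.foldl (fun d c =>
        d.insert ((PySem.List.pyGet? c 1).getD "") (d.getD ((PySem.List.pyGet? c 1).getD "") 0 + 1))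
        (PySem.Dict.empty : PySem.Dict String Int)
      = (clothes.map pvKind).foldl (fun d k => d.insert k (d.getD k 0 + 1)) PySem.Dict.empty :=
    (List.foldl_map (f := pvKind)
      (g := fun (d : PySem.Dict String Int) k => d.insert k (d.getD k 0 + 1))).symm
  rw [h1, PySem.Dict.foldl_insert_getD_add_one_eq_counter]
  generalize clothes.map pvKind = ks
  have hvals : (PySem.Dict.counter ks).values
      = (PySem.Set.ofList ks).map (fun s => ((ks.count s : Int))) := by
    rw [show (PySem.Dict.counter ks).values = (PySem.Dict.counter ks).items.map Prod.snd from rfl,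
      PySem.Dict.items_counter]
    simp [List.map_map, Function.comp_def]
  rw [hvals]
  rw [show ((PySem.Set.ofList ks).map (fun s => ((ks.count s : Int)))).foldl
        (fun a v => a * (v + 1)) 1
      = (PySem.Set.ofList ks).foldl (fun a s => a * ((ks.count s : Int) + 1)) 1 from
        List.foldl_map]
  rw [show ((PySem.Set.ofList ks).map (fun s => ((ks.count s : Int) + 1))).prod
      = (PySem.Set.ofList ks).foldl (fun a s => a * ((ks.count s : Int) + 1)) 1 from by
        rw [List.prod_eq_foldl, List.foldl_map]]

-- ===== VERDICT (by name: the statement is the Claim_ definition above) =====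
theorem solution_spec : Claim_equal_solution := by
  intro clothes _ _
  unfold Spec_solution
  rw [pv_A_value, pv_B_value]
  cases hK : PySem.Set.ofList (clothes.map pvKind) with
  | nil => simp [pvP, PySem.List.combinations_nil_succ]
  | cons x K =>
    have := pv_head_tail x K (fun s => ((clothes.map pvKind).count s : Int))
    simpa using this
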